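-- pv_equiv track=rewrite | github.com/mathornton01/molly-evolve | src/gene_conversion/transformer_genome.py | _group_non_layer_params
-- ===== SOURCE A (Python) =====
-- from typing import Dict, List, Optional, Tuple
--
-- def _group_non_layer_params(
--     params: List[str]
-- ) -> Dict[str, List[str]]:
--     """Group non-layer parameters (embeddings, final LN, etc.)."""
--     groups: Dict[str, List[str]] = {}
--
--     for pname in params:
--         if "wte" in pname or "embed_tokens" in pname or "token_emb" in pname:
--             key = "token_embed"
--         elif "wpe" in pname or "position_embed" in pname:
--             key = "pos_embed"
--         elif "ln_f" in pname or "final_layer_norm" in pname or "norm" in pname: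
--             key = "final_ln"
--         elif "lm_head" in pname:
--             key = "lm_head"
--         else:
--             key = "other_global"
--
--         groups.setdefault(key, []).append(pname)
--
--     return groups
-- ===== SOURCE B (Python) =====
-- _RULES = (
--     ("wte", "token_embed"), ("embed_tokens", "token_embed"), ("token_emb", "token_embed"),
--     ("wpe", "pos_embed"), ("position_embed", "pos_embed"),
--     ("ln_f", "final_ln"), ("final_layer_norm", "final_ln"), ("norm", "final_ln"),
--     ("lm_head", "lm_head"),
-- )
--
-- def _classify(pname):
--     return next((key for sub, key in _RULES if sub in pname), "other_global")
--
-- def _group_non_layer_params(params):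
--     """Staged grouping: classify every name once, then build each group by filtering."""
--     keys = [_classify(p) for p in params]
--     return {k: [p for p, kk in zip(params, keys) if kk == k]
--             for k in dict.fromkeys(keys)}
-- ===== Notes on version B (the rewrite author's own statement) =====
-- stated objective: alternative
-- what changed: B replaces A's single-pass dict accumulation (if/elif chain + setdefault-append per item) with staged passes: classify every name once via a flat substring->key table, dedupe the key list in first-occurrence order, then build each group by filtering the classified pairs.
import Mathlib
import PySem

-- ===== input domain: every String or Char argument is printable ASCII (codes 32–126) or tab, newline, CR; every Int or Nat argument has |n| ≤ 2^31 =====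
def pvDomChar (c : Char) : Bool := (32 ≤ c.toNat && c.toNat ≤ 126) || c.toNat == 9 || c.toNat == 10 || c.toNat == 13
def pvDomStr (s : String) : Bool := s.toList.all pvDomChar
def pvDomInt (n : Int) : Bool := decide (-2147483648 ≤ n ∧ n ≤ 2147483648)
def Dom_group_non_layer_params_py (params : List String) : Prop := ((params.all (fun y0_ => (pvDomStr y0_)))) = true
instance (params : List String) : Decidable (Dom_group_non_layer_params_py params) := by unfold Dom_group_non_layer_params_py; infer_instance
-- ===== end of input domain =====

-- B replaces A's one-pass setdefault-append dict accumulation with staged passes: classify each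
-- name via a flat substring→key table, dedupe keys in first-occurrence order, filter per key
-- (objective: alternative; same behaviour).

-- ===== PORT A =====
-- the if/elif chain of A, inlined in the loop body; setdefault(key, []).append(pname) = modify key [] (· ++ [pname])
def group_non_layer_params_py (params : List String) : List (String × List String) :=
  (params.foldl (fun groups pname =>
    let key :=
      if PySem.Str.isIn "wte" pname || PySem.Str.isIn "embed_tokens" pname || PySem.Str.isIn "token_emb" pname then
        "token_embed"
      else if PySem.Str.isIn "wpe" pname || PySem.Str.isIn "position_embed" pname then
        "pos_embed"
      else if PySem.Str.isIn "ln_f" pname || PySem.Str.isIn "final_layer_norm" pname || PySem.Str.isIn "norm" pname then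
        "final_ln"
      else if PySem.Str.isIn "lm_head" pname then
        "lm_head"
      else
        "other_global"
    groups.modify key [] (fun l => l ++ [pname])) (PySem.Dict.empty : PySem.Dict String (List String))).items

-- ===== PORT B =====
-- B's flat (substring, key) table, scanned first-match
def pvRules : List (String × String) :=
  [("wte", "token_embed"), ("embed_tokens", "token_embed"), ("token_emb", "token_embed"),
   ("wpe", "pos_embed"), ("position_embed", "pos_embed"),
   ("ln_f", "final_ln"), ("final_layer_norm", "final_ln"), ("norm", "final_ln"),
   ("lm_head", "lm_head")]

-- next((key for sub, key in _RULES if sub in pname), "other_global")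
def pvClassify (pname : String) : String :=
  ((pvRules.find? (fun r => PySem.Str.isIn r.1 pname)).map (·.2)).getD "other_global"

def group_non_layer_params_py_alt (params : List String) : List (String × List String) :=
  let keys := params.map pvClassify
  (PySem.List.dedup keys).map (fun k =>
    (k, ((params.zip keys).filter (fun pk => pk.2 == k)).map (·.1)))

-- ===== PRECONDITION & SPEC =====
def Spec_group_non_layer_params_py (params : List String) (out : List (String × List String)) : Prop := out = group_non_layer_params_py_alt params
instance (params : List String) (out : List (String × List String)) : Decidable (Spec_group_non_layer_params_py params out) := by unfold Spec_group_non_layer_params_py; infer_instance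

-- ===== CLAIM (what is proved, stated in full; the proofs are below) =====
def Claim_equal_group_non_layer_params_py : Prop := ∀ (params : List String), Dom_group_non_layer_params_py params → Spec_group_non_layer_params_py params (group_non_layer_params_py params)

-- ===== LEMMAS AND PROOFS =====

-- A's chain key, named for the proofs
def pvChainKey (pname : String) : String :=
  if PySem.Str.isIn "wte" pname || PySem.Str.isIn "embed_tokens" pname || PySem.Str.isIn "token_emb" pname then
    "token_embed"
  else if PySem.Str.isIn "wpe" pname || PySem.Str.isIn "position_embed" pname then
    "pos_embed"
  else if PySem.Str.isIn "ln_f" pname || PySem.Str.isIn "final_layer_norm" pname || PySem.Str.isIn "norm" pname then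
    "final_ln"
  else if PySem.Str.isIn "lm_head" pname then
    "lm_head"
  else
    "other_global"

-- B's flat-table lookup computes the same key as A's if/elif chain, for every string
theorem pvKey_eq (pname : String) : pvClassify pname = pvChainKey pname := by
  unfold pvClassify pvChainKey pvRules
  simp only [List.find?]
  repeat' split
  all_goals simp_all

theorem pvA_items (params : List String) :
    group_non_layer_params_py params =
      (PySem.Set.ofList (params.map pvChainKey)).map (fun k =>
        (k, ((params.map (fun x => (pvChainKey x, x))).filter (fun p => p.1 == k)).map (·.2))) := by
  unfold group_non_layer_params_py
  have hfold : (params.foldl (fun groups pname =>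
      groups.modify (pvChainKey pname) [] (fun l => l ++ [pname]))
      (PySem.Dict.empty : PySem.Dict String (List String))) =
      ((params.map (fun x => (pvChainKey x, x))).foldl
        (fun d p => d.modify p.1 [] (fun l => l ++ [p.2])) PySem.Dict.empty) := by
    rw [List.foldl_map]
  show (params.foldl (fun groups pname =>
      groups.modify (pvChainKey pname) [] (fun l => l ++ [pname]))
      (PySem.Dict.empty : PySem.Dict String (List String))).items = _
  rw [hfold]
  set l := params.map (fun x => (pvChainKey x, x)) with hl
  have hnd : ((l.foldl (fun d p => d.modify p.1 [] (fun lst => lst ++ [p.2]))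
      (PySem.Dict.empty : PySem.Dict String (List String)))).keys.Nodup := by
    exact PySem.Dict.nodup_keys_foldl_modify_key l (·.1) [] (fun d p lst => lst ++ [p.2])
      PySem.Dict.empty (by simp [pysem])
  rw [PySem.Dict.items_eq_map_keys _ hnd []]
  have hkeys : (l.foldl (fun d p => d.modify p.1 [] (fun lst => lst ++ [p.2]))
      (PySem.Dict.empty : PySem.Dict String (List String))).keys =
      PySem.Set.ofList (params.map pvChainKey) := by
    have := PySem.Dict.keys_foldl_modify_key (l := l) (key := (·.1)) (d0 := [])
      (f := fun d p lst => lst ++ [p.2]) (d := (PySem.Dict.empty : PySem.Dict String (List String)))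
    rw [this]
    simp [hl, List.map_map, Function.comp_def, PySem.Set.update_nil_left]
  rw [hkeys]
  refine List.map_congr_left (fun k _ => ?_)
  congr 1
  have := PySem.Dict.getD_foldl_modify_append (l := l) (d := (PySem.Dict.empty : PySem.Dict String (List String))) (c := k)
  rw [this]
  simp [pysem]

theorem pvZipMap {α β : Type} (f : α → β) (l : List α) :
    l.zip (l.map f) = l.map (fun x => (x, f x)) := by
  induction l with
  | nil => rfl
  | cons a t ih => simp [ih]

theorem pvB_shape (params : List String) :
    group_non_layer_params_py_alt params =
      (PySem.Set.ofList (params.map pvChainKey)).map (fun k =>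
        (k, ((params.map (fun x => (pvChainKey x, x))).filter (fun p => p.1 == k)).map (·.2))) := by
  unfold group_non_layer_params_py_alt
  dsimp only
  rw [List.map_congr_left (fun x _ => pvKey_eq x), pvZipMap, PySem.List.dedup_eq_ofList]
  refine List.map_congr_left (fun k _ => ?_)
  congr 1
  simp [List.filter_map, List.map_map, Function.comp_def]

-- ===== VERDICT (by name: the statement is the Claim_ definition above) =====
theorem group_non_layer_params_py_spec : Claim_equal_group_non_layer_params_py := by
  intro params _
  unfold Spec_group_non_layer_params_py
  rw [pvA_items, pvB_shape]
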